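-- pv_equiv track=rewrite | github.com/GoBeromsu/solvedAcBot | run.py | formatProblems
-- ===== SOURCE A (Python) =====
-- def formatProblems(solvedToday:list):
--     tweet=''
--     count=1
--     for problem in solvedToday:
--         if count ==4:
--             tweet+= f"「{problem[0]} {problem[1]}」...\n"
--             break
--         tweet+= f"「 {problem[0]} {problem[1]} 」\n"
--         count+=1
--     return tweet
-- ===== SOURCE B (Python) =====
-- def formatProblems(solvedToday: list):
--     # Loop-free: the result only depends on the first four elements, so a
--     # structural pattern match over the list shape enumerates all cases.
--     def line(p):
--         return f"「 {p[0]} {p[1]} 」\n"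
--
--     def trunc(p):
--         return f"「{p[0]} {p[1]}」...\n"
--
--     match solvedToday:
--         case []:
--             return ''
--         case [a]:
--             return line(a)
--         case [a, b]:
--             return line(a) + line(b)
--         case [a, b, c]:
--             return line(a) + line(b) + line(c)
--         case [a, b, c, d, *_]:
--             return line(a) + line(b) + line(c) + trunc(d)
-- ===== Notes on version B (the rewrite author's own statement) =====
-- stated objective: alternative
-- what changed: Replaces A's counted loop with a break by a loop-free structural pattern match over the list shape: five explicit cases ([], one, two, three, four-or-more elements) each return the fully concatenated tweet directly, with no counter, no iteration and no accumulator.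
import Mathlib
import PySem

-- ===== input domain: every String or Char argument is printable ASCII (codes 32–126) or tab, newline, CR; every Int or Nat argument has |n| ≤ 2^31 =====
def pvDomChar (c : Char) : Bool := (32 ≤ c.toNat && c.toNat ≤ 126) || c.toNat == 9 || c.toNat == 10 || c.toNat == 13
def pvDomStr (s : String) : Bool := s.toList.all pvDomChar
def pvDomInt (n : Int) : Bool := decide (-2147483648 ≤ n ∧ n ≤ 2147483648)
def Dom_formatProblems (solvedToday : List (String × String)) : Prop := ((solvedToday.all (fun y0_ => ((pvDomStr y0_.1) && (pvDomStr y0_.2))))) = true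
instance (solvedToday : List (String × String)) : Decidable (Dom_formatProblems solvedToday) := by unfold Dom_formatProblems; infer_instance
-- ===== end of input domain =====

-- B replaces A's counted loop-with-break by a loop-free structural pattern match over the list shape (five explicit cases) -- objective: alternative.


-- ===== PORT A =====
-- A: counted loop over the list, break (with a truncated line) when count == 4
def fpA_loop : List (String × String) → String → Int → String
  | [], tweet, _ => tweet
  | p :: rest, tweet, count =>
    if count == 4 then tweet ++ ("「" ++ p.1 ++ " " ++ p.2 ++ "」...\n")
    else fpA_loop rest (tweet ++ ("「 " ++ p.1 ++ " " ++ p.2 ++ " 」\n")) (count + 1)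

def formatProblems (solvedToday : List (String × String)) : String :=
  fpA_loop solvedToday "" 1

-- ===== PORT B =====
-- B: loop-free structural pattern match on the list shape
def fpB_line (p : String × String) : String := "「 " ++ p.1 ++ " " ++ p.2 ++ " 」\n"
def fpB_trunc (p : String × String) : String := "「" ++ p.1 ++ " " ++ p.2 ++ "」...\n"

def formatProblems_alt (solvedToday : List (String × String)) : String :=
  match solvedToday with
  | [] => ""
  | [a] => fpB_line a
  | [a, b] => fpB_line a ++ fpB_line b
  | [a, b, c] => fpB_line a ++ fpB_line b ++ fpB_line c
  | a :: b :: c :: d :: _ => fpB_line a ++ fpB_line b ++ fpB_line c ++ fpB_trunc d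

-- ===== PRECONDITION & SPEC =====
def Spec_formatProblems (solvedToday : List (String × String)) (out : String) : Prop := out = formatProblems_alt solvedToday
instance (solvedToday : List (String × String)) (out : String) : Decidable (Spec_formatProblems solvedToday out) := by unfold Spec_formatProblems; infer_instance

-- ===== CLAIM =====
def Claim_equal_formatProblems : Prop := ∀ (solvedToday : List (String × String)), Dom_formatProblems solvedToday → Spec_formatProblems solvedToday (formatProblems solvedToday)

-- ===== LEMMAS AND PROOFS =====

-- ===== VERDICT =====
theorem formatProblems_spec : Claim_equal_formatProblems := by
  intro s _
  unfold Spec_formatProblems formatProblems formatProblems_alt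
  match s with
  | [] => rfl
  | [a] => simp [fpA_loop, fpB_line]
  | [a, b] => simp [fpA_loop, fpB_line]
  | [a, b, c] => simp [fpA_loop, fpB_line]
  | a :: b :: c :: d :: rest => simp [fpA_loop, fpB_line, fpB_trunc]
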